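-- pv_equiv track=rewrite | github.com/tao3k/omni-devenv-fusion | packages/python/foundation/src/omni/foundation/api/link_graph_search_options_schema.py | _coerce_edge_types
-- ===== SOURCE A (Python) =====
-- from typing import Any, Literal, cast
--
-- _VALID_EDGE_TYPES = {"structural", "semantic", "provisional", "verified"}
--
-- def _clean_string_list(items: list[Any] | tuple[Any, ...] | None) -> list[str]:
--     if not items:
--         return []
--     out: list[str] = []
--     seen: set[str] = set()
--     for item in items:
--         text = str(item).strip()
--         if not text:
--             continue
--         key = text.lower()
--         if key in seen:
--             continue
--         seen.add(key)
--         out.append(text)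
--     return out
--
-- def _coerce_edge_types(edge_types: list[str] | tuple[str, ...] | None) -> list[str]:
--     cleaned = _clean_string_list(cast("list[Any] | tuple[Any, ...] | None", edge_types))
--     if not cleaned:
--         return []
--     out: list[str] = []
--     for edge_type in cleaned:
--         normalized = edge_type.strip().lower()
--         if normalized not in _VALID_EDGE_TYPES:
--             raise ValueError(
--                 "link_graph search options schema violation at filters.edge_types: "
--                 f"unknown edge type '{normalized}'"
--             )
--         if normalized not in out:
--             out.append(normalized)
--     return out
-- ===== SOURCE B (Python) =====
-- _VALID_EDGE_TYPES = {"structural", "semantic", "provisional", "verified"}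
--
-- def _coerce_edge_types(edge_types):
--     if not edge_types:
--         return []
--     seen: set[str] = set()
--     out: list[str] = []
--     for item in edge_types:
--         text = str(item).strip()
--         if not text:
--             continue
--         key = text.lower()
--         if key in seen:
--             continue
--         seen.add(key)
--         if key not in _VALID_EDGE_TYPES:
--             raise ValueError(
--                 "link_graph search options schema violation at filters.edge_types: "
--                 f"unknown edge type '{key}'"
--             )
--         out.append(key)
--     return out
-- ===== Notes on version B (the rewrite author's own statement) =====
-- stated objective: simpler
-- what changed: B replaces A's two passes (clean/dedupe keeping original texts, then re-strip, lowercase, validate and dedupe again) with one single pass that strips, dedupes by lowercased key and validates each item once, appending the key directly.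
import Mathlib
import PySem

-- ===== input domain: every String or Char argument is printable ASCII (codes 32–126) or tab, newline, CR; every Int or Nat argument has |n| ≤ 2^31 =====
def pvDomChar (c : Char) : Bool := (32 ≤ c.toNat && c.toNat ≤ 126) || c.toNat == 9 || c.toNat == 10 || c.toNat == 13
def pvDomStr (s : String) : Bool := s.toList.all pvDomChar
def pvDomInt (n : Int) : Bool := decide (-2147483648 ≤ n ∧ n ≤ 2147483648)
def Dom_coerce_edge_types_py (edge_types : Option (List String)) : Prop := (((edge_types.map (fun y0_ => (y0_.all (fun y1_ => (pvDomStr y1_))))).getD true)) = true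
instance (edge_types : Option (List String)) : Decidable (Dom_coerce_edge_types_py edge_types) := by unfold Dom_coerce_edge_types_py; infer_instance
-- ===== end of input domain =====

-- B merges A's two passes (clean-then-validate) into one single-pass loop that keeps
-- lowercased keys directly; equivalence of the return values is proved on Pre_ (the
-- inputs where A returns normally instead of raising ValueError).

def pvValid : List String := ["structural", "semantic", "provisional", "verified"]

-- ===== PORT A =====
-- _clean_string_list's loop: state (out, seen); text = item.strip(); skip empties,
-- dedupe by lowercased key, append the ORIGINAL stripped text.
def pvCleanLoop : List String → List String → PySem.Set String → List String
  | [], out, _ => out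
  | item :: rest, out, seen =>
    let text := PySem.Str.strip item
    if text = "" then pvCleanLoop rest out seen
    else
      let key := PySem.Str.lower text
      if PySem.Set.contains seen key then pvCleanLoop rest out seen
      else pvCleanLoop rest (out ++ [text]) (PySem.Set.add seen key)

-- _coerce_edge_types's second loop; none = the ValueError raise.
def pvCoerceLoop : List String → List String → Option (List String)
  | [], out => some out
  | edge_type :: rest, out =>
    let normalized := PySem.Str.lower (PySem.Str.strip edge_type)
    if normalized ∈ pvValid then
      if normalized ∈ out then pvCoerceLoop rest out
      else pvCoerceLoop rest (out ++ [normalized])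
    else none

def coerce_edge_types_py (edge_types : Option (List String)) : List String :=
  let cleaned :=
    match edge_types with
    | none => []
    | some items => if items = [] then [] else pvCleanLoop items [] PySem.Set.empty
  if cleaned = [] then []
  else (pvCoerceLoop cleaned []).getD []

-- ===== PORT B =====
-- single pass: strip, skip empty, dedupe by key, validate, append the KEY; none = raise.
def pvAltLoop : List String → PySem.Set String → List String → Option (List String)
  | [], _, out => some out
  | item :: rest, seen, out =>
    let text := PySem.Str.strip item
    if text = "" then pvAltLoop rest seen out
    else
      let key := PySem.Str.lower text
      if PySem.Set.contains seen key then pvAltLoop rest seen out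
      else if key ∈ pvValid then pvAltLoop rest (PySem.Set.add seen key) (out ++ [key])
      else none

def coerce_edge_types_py_alt (edge_types : Option (List String)) : List String :=
  match edge_types with
  | none => []
  | some items =>
    if items = [] then []
    else (pvAltLoop items PySem.Set.empty []).getD []

-- ===== PRECONDITION & SPEC =====
-- Pre_ excludes exactly the inputs on which A raises ValueError: some element whose
-- stripped text is non-empty but whose lowercased form is not a valid edge type.
def Pre_coerce_edge_types_py (edge_types : Option (List String)) : Prop :=
  ∀ s ∈ edge_types.getD [],
    PySem.Str.strip s = "" ∨ PySem.Str.lower (PySem.Str.strip s) ∈ pvValid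

instance (edge_types : Option (List String)) : Decidable (Pre_coerce_edge_types_py edge_types) := by
  unfold Pre_coerce_edge_types_py; infer_instance

def pvWitness_coerce_edge_types_py : Option (List String) :=
  some ["Structural", " semantic ", "STRUCTURAL", "", "verified"]

def Spec_coerce_edge_types_py (edge_types : Option (List String)) (out : List String) : Prop := out = coerce_edge_types_py_alt edge_types
instance (edge_types : Option (List String)) (out : List String) : Decidable (Spec_coerce_edge_types_py edge_types out) := by unfold Spec_coerce_edge_types_py; infer_instance

-- ===== CLAIM (what is proved, stated in full; the proofs are below) =====
def Claim_equal_coerce_edge_types_py : Prop := ∀ (edge_types : Option (List String)), Dom_coerce_edge_types_py edge_types → Pre_coerce_edge_types_py edge_types → Spec_coerce_edge_types_py edge_types (coerce_edge_types_py edge_types)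

-- ===== LEMMAS AND PROOFS =====

-- strip is idempotent (needed because A's second pass re-strips already-stripped texts)
theorem pv_dropWhile_idem (p : Char → Bool) (l : List Char) :
    List.dropWhile p (List.dropWhile p l) = List.dropWhile p l := by
  induction l with
  | nil => rfl
  | cons a t ih =>
    by_cases h : p a = true
    · simp [h, ih]
    · simp [h]

theorem pv_head_lstrip_not_space (l : List Char) (a : Char) (t : List Char)
    (h : PySem.Chars.lstrip l = a :: t) : PySem.Chars.isspace a = false := by
  unfold PySem.Chars.lstrip at h
  have := List.head_dropWhile_not (p := PySem.Chars.isspace) (l := l)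
  rw [h] at this
  simpa using this (by simp)

theorem pv_rstrip_prefix (l : List Char) : PySem.Chars.rstrip l <+: l := by
  unfold PySem.Chars.rstrip
  have h := List.dropWhile_suffix (l := l.reverse) (p := PySem.Chars.isspace)
  have := List.reverse_prefix.mpr (by simpa using h)
  simpa using this

theorem pv_strip_idem_chars (l : List Char) :
    PySem.Chars.strip (PySem.Chars.strip l) = PySem.Chars.strip l := by
  unfold PySem.Chars.strip
  -- first: lstrip (rstrip (lstrip l)) = rstrip (lstrip l)
  have h1 : PySem.Chars.lstrip (PySem.Chars.rstrip (PySem.Chars.lstrip l))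
      = PySem.Chars.rstrip (PySem.Chars.lstrip l) := by
    cases hm : PySem.Chars.rstrip (PySem.Chars.lstrip l) with
    | nil => rfl
    | cons a t =>
      have hpre : a :: t <+: PySem.Chars.lstrip l := hm ▸ pv_rstrip_prefix _
      obtain ⟨u, hu⟩ := hpre
      have ha : PySem.Chars.isspace a = false := pv_head_lstrip_not_space l a (t ++ u) (by simpa using hu.symm)
      unfold PySem.Chars.lstrip
      simp [ha]
  rw [h1]
  -- second: rstrip (rstrip m) = rstrip m
  unfold PySem.Chars.rstrip
  simp [pv_dropWhile_idem]

theorem pv_strip_idem (s : String) : PySem.Str.strip (PySem.Str.strip s) = PySem.Str.strip s := by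
  apply String.ext
  simpa [PySem.Str.toList_strip] using pv_strip_idem_chars s.toList

-- helper functions describing the loops' outputs
def pvTexts : List String → PySem.Set String → List String
  | [], _ => []
  | item :: rest, seen =>
    let text := PySem.Str.strip item
    if text = "" then pvTexts rest seen
    else
      let key := PySem.Str.lower text
      if PySem.Set.contains seen key then pvTexts rest seen
      else text :: pvTexts rest (PySem.Set.add seen key)

theorem pv_cleanLoop_eq (l : List String) :
    ∀ out seen, pvCleanLoop l out seen = out ++ pvTexts l seen := by
  induction l with
  | nil => intro out seen; simp [pvCleanLoop, pvTexts]
  | cons a rest ih =>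
    intro out seen
    simp only [pvCleanLoop, pvTexts]
    split_ifs with h1 h2
    · exact ih out seen
    · exact ih out seen
    · rw [ih, List.append_assoc]; rfl

theorem pv_altLoop_eq (l : List String)
    (hpre : ∀ s ∈ l, PySem.Str.strip s = "" ∨ PySem.Str.lower (PySem.Str.strip s) ∈ pvValid) :
    ∀ seen out, pvAltLoop l seen out = some (out ++ (pvTexts l seen).map PySem.Str.lower) := by
  induction l with
  | nil => intro seen out; simp [pvAltLoop, pvTexts]
  | cons a rest ih =>
    intro seen out
    have hpre' : ∀ s ∈ rest, PySem.Str.strip s = "" ∨ PySem.Str.lower (PySem.Str.strip s) ∈ pvValid :=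
      fun s hs => hpre s (List.mem_cons_of_mem _ hs)
    simp only [pvAltLoop, pvTexts]
    split_ifs with h1 h2 h3
    · exact ih hpre' seen out
    · exact ih hpre' seen out
    · rw [ih hpre', List.map_cons, List.append_assoc]; rfl
    · exact absurd ((hpre a (List.mem_cons_self)).resolve_left h1) h3

-- every text produced is a non-empty stripped string whose key is valid (under Pre_)
-- and the keys are fresh w.r.t. seen and pairwise distinct
theorem pv_texts_props (l : List String)
    (hpre : ∀ s ∈ l, PySem.Str.strip s = "" ∨ PySem.Str.lower (PySem.Str.strip s) ∈ pvValid) :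
    ∀ seen,
      (∀ t ∈ pvTexts l seen, PySem.Str.strip t = t ∧ PySem.Str.lower t ∈ pvValid ∧
        PySem.Str.lower t ∉ seen) ∧ ((pvTexts l seen).map PySem.Str.lower).Nodup := by
  induction l with
  | nil => intro seen; simp [pvTexts]
  | cons a rest ih =>
    intro seen
    have hpre' : ∀ s ∈ rest, PySem.Str.strip s = "" ∨ PySem.Str.lower (PySem.Str.strip s) ∈ pvValid :=
      fun s hs => hpre s (List.mem_cons_of_mem _ hs)
    simp only [pvTexts]
    split_ifs with h1 h2
    · exact ih hpre' seen
    · exact ih hpre' seen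
    · obtain ⟨ihm, ihnd⟩ := ih hpre' (PySem.Set.add seen (PySem.Str.lower (PySem.Str.strip a)))
      have hkey : PySem.Str.lower (PySem.Str.strip a) ∈ pvValid :=
        (hpre a (List.mem_cons_self)).resolve_left h1
      have hseen : PySem.Str.lower (PySem.Str.strip a) ∉ seen := by
        intro hc; exact h2 ((PySem.Set.contains_iff _ _).mpr hc)
      constructor
      · intro t ht
        rcases List.mem_cons.mp ht with rfl | ht'
        · exact ⟨pv_strip_idem a, hkey, hseen⟩
        · obtain ⟨hs1, hs2, hs3⟩ := ihm t ht'
          refine ⟨hs1, hs2, fun hc => hs3 ?_⟩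
          exact (PySem.Set.mem_add _ _ _).mpr (Or.inl hc)
      · rw [List.map_cons]
        refine List.nodup_cons.mpr ⟨?_, ihnd⟩
        intro hc
        obtain ⟨t, ht, heq⟩ := List.mem_map.mp hc
        have := (ihm t ht).2.2
        exact this ((PySem.Set.mem_add _ _ _).mpr (Or.inr heq))

-- A's second pass on a list of already-stripped, valid, key-distinct texts just lowercases
theorem pv_coerceLoop_eq (cs : List String)
    (h1 : ∀ t ∈ cs, PySem.Str.strip t = t)
    (h2 : ∀ t ∈ cs, PySem.Str.lower t ∈ pvValid)
    (h3 : (cs.map PySem.Str.lower).Nodup) :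
    ∀ acc, (∀ t ∈ cs, PySem.Str.lower t ∉ acc) →
      pvCoerceLoop cs acc = some (acc ++ cs.map PySem.Str.lower) := by
  induction cs with
  | nil => intro acc _; simp [pvCoerceLoop]
  | cons t rest ih =>
    intro acc hacc
    simp only [pvCoerceLoop]
    rw [h1 t (List.mem_cons_self)]
    have h3' : PySem.Str.lower t ∉ rest.map PySem.Str.lower ∧ (rest.map PySem.Str.lower).Nodup := by
      rw [List.map_cons] at h3; exact List.nodup_cons.mp h3
    split_ifs with hv ho
    · exact absurd ho (hacc t (List.mem_cons_self))
    · rw [ih (fun u hu => h1 u (List.mem_cons_of_mem _ hu))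
          (fun u hu => h2 u (List.mem_cons_of_mem _ hu))
          h3'.2
          (acc ++ [PySem.Str.lower t])]
      · simp
      · intro u hu
        simp only [List.mem_append, List.mem_singleton]
        rintro (hc | hc)
        · exact hacc u (List.mem_cons_of_mem _ hu) hc
        · exact h3'.1 (hc ▸ List.mem_map_of_mem hu)
    · exact absurd (h2 t (List.mem_cons_self)) hv

-- ===== VERDICT (by name: the statement is the Claim_ definition above) =====
theorem coerce_edge_types_py_spec : Claim_equal_coerce_edge_types_py := by
  intro edge_types _ hpre
  unfold Spec_coerce_edge_types_py coerce_edge_types_py coerce_edge_types_py_alt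
  cases edge_types with
  | none => rfl
  | some items =>
    by_cases hnil : items = []
    · simp [hnil]
    · have hpre' : ∀ s ∈ items, PySem.Str.strip s = "" ∨ PySem.Str.lower (PySem.Str.strip s) ∈ pvValid := by
        simpa [Pre_coerce_edge_types_py] using hpre
      simp only [hnil, if_false]
      rw [pv_cleanLoop_eq, pv_altLoop_eq items hpre', List.nil_append, List.nil_append]
      obtain ⟨hprops, hnd⟩ := pv_texts_props items hpre' PySem.Set.empty
      by_cases hc : pvTexts items PySem.Set.empty = []
      · rw [if_pos hc, hc]; rfl
      · rw [if_neg hc,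
          pv_coerceLoop_eq _ (fun t ht => (hprops t ht).1) (fun t ht => (hprops t ht).2.1) hnd []
            (fun t _ hx => (List.not_mem_nil) hx)]
        simp
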